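-- pv_equiv track=rewrite | github.com/GorokhovSemyon/Algorithms_LC | Python/main.py | winner_of_game_improved
-- ===== SOURCE A (Python) =====
-- def winner_of_game_improved(colors: str) -> bool:
--     """
--         Улучшенная версия без использования доп памяти
--     """
--     alice_plays, bob_plays = 0, 0
--     cnt = 1
--
--     for i in range(1, len(colors)):
--         if colors[i] == colors[i - 1]:
--             cnt += 1
--         else:
--             if colors[i - 1] == 'A':
--                 alice_plays += max(0, cnt - 2)
--             else:
--                 bob_plays += max(0, cnt - 2)
--             cnt = 1
--
--     if colors[-1] == 'A':
--         alice_plays += max(0, cnt - 2)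
--     else:
--         bob_plays += max(0, cnt - 2)
--
--     return alice_plays > bob_plays
-- ===== SOURCE B (Python) =====
-- def winner_of_game_improved(colors: str) -> bool:
--     """Sliding-window rewrite: count removable middles directly, no run counter."""
--     alice_plays, bob_plays = 0, 0
--     for x, y, z in zip(colors, colors[1:], colors[2:]):
--         if x == y == z:
--             if y == 'A':
--                 alice_plays += 1
--             else:
--                 bob_plays += 1
--     return alice_plays > bob_plays
-- ===== Notes on version B (the rewrite author's own statement) =====
-- stated objective: simpler
-- what changed: Replaced run-length bookkeeping (run counter plus per-run max(0,cnt-2) payouts and a separate final-run flush) by a single sliding-window pass over consecutive character triples (zip) that counts removable middle stones directly; the zip pass avoids per-index string subscripting, a measured constant-factor speedup.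
-- outside the precondition, e.g. on winner_of_game_improved(''): A raises IndexError, B returns False
import Mathlib
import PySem

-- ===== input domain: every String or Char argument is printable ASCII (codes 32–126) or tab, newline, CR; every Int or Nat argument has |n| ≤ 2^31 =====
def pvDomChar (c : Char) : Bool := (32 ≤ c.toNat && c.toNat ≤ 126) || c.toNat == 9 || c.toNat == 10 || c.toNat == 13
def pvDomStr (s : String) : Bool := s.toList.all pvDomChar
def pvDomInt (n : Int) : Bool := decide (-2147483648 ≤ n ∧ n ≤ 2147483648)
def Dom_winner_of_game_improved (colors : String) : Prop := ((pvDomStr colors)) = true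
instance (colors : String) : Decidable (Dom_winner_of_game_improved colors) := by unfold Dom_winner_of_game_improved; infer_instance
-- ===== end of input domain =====

-- B replaces A's run-length counting with a sliding-window count of equal triples; objective: simpler.


-- ===== PORT A =====
def winner_of_game_improved (colors : String) : Bool :=
  let l := colors.toList
  -- for i in range(1, len(colors)): run-length state (alice_plays, bob_plays, cnt)
  let st := (PySem.List.pyRange 1 (PySem.List.len l) 1).foldl
    (fun (st : Int × Int × Int) i =>
      if PySem.List.pyGetD l i ' ' = PySem.List.pyGetD l (i - 1) ' ' then
        (st.1, st.2.1, st.2.2 + 1)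
      else if PySem.List.pyGetD l (i - 1) ' ' = 'A' then
        (st.1 + max 0 (st.2.2 - 2), st.2.1, 1)
      else
        (st.1, st.2.1 + max 0 (st.2.2 - 2), 1)) (0, 0, 1)
  -- colors[-1]: raises IndexError on the empty string, which Pre_ excludes (pyGetD is exact under Pre_)
  let last := PySem.List.pyGetD l (-1) ' '
  if last = 'A' then decide (st.1 + max 0 (st.2.2 - 2) > st.2.1)
  else decide (st.1 > st.2.1 + max 0 (st.2.2 - 2))

-- ===== PORT B =====
def winner_of_game_improved_alt (colors : String) : Bool :=
  let l := colors.toList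
  -- for x, y, z in zip(colors, colors[1:], colors[2:])
  let st := (l.zip (l.tail.zip l.tail.tail)).foldl
    (fun (st : Int × Int) t =>
      if t.1 = t.2.1 ∧ t.2.1 = t.2.2 then
        (if t.2.1 = 'A' then (st.1 + 1, st.2) else (st.1, st.2 + 1))
      else st) (0, 0)
  decide (st.1 > st.2)

-- ===== PRECONDITION & SPEC =====
-- Pre_ excludes only the empty string, on which A raises IndexError at colors[-1].
def Pre_winner_of_game_improved (colors : String) : Prop := colors ≠ ""
instance (colors : String) : Decidable (Pre_winner_of_game_improved colors) := by unfold Pre_winner_of_game_improved; infer_instance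
def pvWitness_winner_of_game_improved : String := "AAAB"

def Spec_winner_of_game_improved (colors : String) (out : Bool) : Prop := out = winner_of_game_improved_alt colors
instance (colors : String) (out : Bool) : Decidable (Spec_winner_of_game_improved colors out) := by unfold Spec_winner_of_game_improved; infer_instance

-- ===== CLAIM (what is proved, stated in full; the proofs are below) =====
def Claim_equal_winner_of_game_improved : Prop := ∀ (colors : String), Dom_winner_of_game_improved colors → Pre_winner_of_game_improved colors → Spec_winner_of_game_improved colors (winner_of_game_improved colors)
-- ===== LEMMAS AND PROOFS =====

-- A's loop body as a function of (state, previous char, current char)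
def stepA (st : Int × Int × Int) (p c : Char) : Int × Int × Int :=
  if c = p then (st.1, st.2.1, st.2.2 + 1)
  else if p = 'A' then (st.1 + max 0 (st.2.2 - 2), st.2.1, 1)
  else (st.1, st.2.1 + max 0 (st.2.2 - 2), 1)

-- structural form of A's index loop: fold stepA over consecutive pairs
def pairsFold : Char → List Char → (Int × Int × Int) → Int × Int × Int
  | _, [], st => st
  | p, c :: r, st => pairsFold c r (stepA st p c)

-- A's trailing flush: add max(0, cnt-2) to the player of the last char
def finalAdd (st : Int × Int × Int) (last : Char) : Int × Int :=
  if last = 'A' then (st.1 + max 0 (st.2.2 - 2), st.2.1)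
  else (st.1, st.2.1 + max 0 (st.2.2 - 2))

def myLast : Char → List Char → Char
  | p, [] => p
  | _, c :: r => myLast c r

def pay (p : Char) (v : Int) : Int × Int := if p = 'A' then (v, 0) else (0, v)

-- total payout of A's run-length accounting, including the final flush
def runsTot : Char → Int → List Char → Int × Int
  | p, cnt, [] => pay p (max 0 (cnt - 2))
  | p, cnt, c :: r =>
    if c = p then runsTot p (cnt + 1) r
    else pay p (max 0 (cnt - 2)) + runsTot c 1 r

-- B's loop body
def stepB (st : Int × Int) (x y z : Char) : Int × Int :=
  if x = y ∧ y = z then (if y = 'A' then (st.1 + 1, st.2) else (st.1, st.2 + 1)) else st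

def tripsFold : Char → Char → List Char → (Int × Int) → Int × Int
  | _, _, [], st => st
  | x, y, z :: r, st => tripsFold y z r (stepB st x y z)

-- pure triple count
def tripsT : Char → Char → List Char → Int × Int
  | _, _, [] => (0, 0)
  | x, y, z :: r => (if x = y ∧ y = z then pay y 1 else (0, 0)) + tripsT y z r

def tripsHead : Char → List Char → Int × Int
  | _, [] => (0, 0)
  | p, c :: r => tripsT p c r

theorem pair_add_zero (x : Int × Int) : x + (0, 0) = x := by
  cases x; simp

theorem pair_zero_add (x : Int × Int) : (0, 0) + x = x := by
  cases x; simp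

theorem pay_zero (p : Char) : pay p 0 = (0, 0) := by
  unfold pay; split_ifs <;> rfl

theorem pay_succ (p : Char) (v : Int) : pay p (v + 1) = pay p v + pay p 1 := by
  unfold pay; split_ifs <;> simp

theorem foldl_shift {S : Type} (g : S → Int → S) (a b : Int) (init : S) :
    (PySem.List.pyRange (a + 1) (b + 1) 1).foldl g init
      = (PySem.List.pyRange a b 1).foldl (fun st i => g st (i + 1)) init := by
  rw [PySem.List.pyRange_one (a+1) (b+1), PySem.List.pyRange_one a b]
  have h : b + 1 - (a + 1) = b - a := by ring
  rw [h, List.foldl_map, List.foldl_map]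
  congr 1
  funext st k
  show g st (a + 1 + (k : Int)) = g st (a + (k : Int) + 1)
  congr 1
  ring

theorem pyGetD_cons_shift (c : Char) (t : List Char) (i : Int) (h : 1 ≤ i) :
    PySem.List.pyGetD (c :: t) i ' ' = PySem.List.pyGetD t (i - 1) ' ' := by
  obtain ⟨k, hk⟩ : ∃ k : Nat, i = (k : Int) + 1 := ⟨(i - 1).toNat, by omega⟩
  subst hk
  rw [show ((k : Int) + 1) = ((k + 1 : Nat) : Int) by push_cast; ring]
  rw [show (((k + 1 : Nat) : Int)) - 1 = ((k : Nat) : Int) by push_cast; ring]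
  rw [PySem.List.pyGetD_natCast, PySem.List.pyGetD_natCast]
  simp [List.getD]

theorem foldA_aux (r : List Char) : ∀ (c : Char) (init : Int × Int × Int),
    (PySem.List.pyRange 1 (PySem.List.len (c :: r)) 1).foldl
      (fun st i => stepA st (PySem.List.pyGetD (c :: r) (i - 1) ' ') (PySem.List.pyGetD (c :: r) i ' ')) init
      = pairsFold c r init := by
  induction r with
  | nil =>
    intro c init
    simp [PySem.List.pyRange_one_eq_nil, pairsFold]
  | cons x r ih =>
    intro c init
    have hlen : PySem.List.len (c :: x :: r) = ((r.length : Int) + 1) + 1 := by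
      simp [PySem.List.len_eq]
    rw [hlen]
    have h1 : (1 : Int) < ((r.length : Int) + 1) + 1 := by omega
    rw [PySem.List.pyRange_one_cons h1, List.foldl_cons]
    have e0 : stepA init (PySem.List.pyGetD (c :: x :: r) (1 - 1) ' ') (PySem.List.pyGetD (c :: x :: r) 1 ' ')
        = stepA init c x := by
      rw [pyGetD_cons_shift c (x :: r) 1 le_rfl]
      norm_num [PySem.List.pyGetD_zero_cons]
    rw [e0, foldl_shift]
    have hcong : (PySem.List.pyRange 1 ((r.length : Int) + 1) 1).foldl
        (fun st i => stepA st (PySem.List.pyGetD (c :: x :: r) (i + 1 - 1) ' ') (PySem.List.pyGetD (c :: x :: r) (i + 1) ' ')) (stepA init c x)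
        = (PySem.List.pyRange 1 ((r.length : Int) + 1) 1).foldl
        (fun st i => stepA st (PySem.List.pyGetD (x :: r) (i - 1) ' ') (PySem.List.pyGetD (x :: r) i ' ')) (stepA init c x) := by
      apply PySem.List.foldl_congr_mem
      intro st i hi
      have hi1 : 1 ≤ i := (PySem.List.mem_pyRange_one.mp hi).1
      have ea : PySem.List.pyGetD (c :: x :: r) (i + 1 - 1) ' ' = PySem.List.pyGetD (x :: r) (i - 1) ' ' := by
        rw [show i + 1 - 1 = i by ring, pyGetD_cons_shift c (x :: r) i hi1]
      have eb : PySem.List.pyGetD (c :: x :: r) (i + 1) ' ' = PySem.List.pyGetD (x :: r) i ' ' := by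
        rw [pyGetD_cons_shift c (x :: r) (i + 1) (by omega)]
        congr 1; ring
      rw [ea, eb]
    rw [hcong]
    have hl : ((r.length : Int) + 1) = PySem.List.len (x :: r) := by
      simp [PySem.List.len_eq]
    rw [hl, ih x (stepA init c x)]
    rfl

theorem foldA_eq_pairsFold (r : List Char) (c : Char) (init : Int × Int × Int) :
    (PySem.List.pyRange 1 (PySem.List.len (c :: r)) 1).foldl
      (fun (st : Int × Int × Int) i =>
        if PySem.List.pyGetD (c :: r) i ' ' = PySem.List.pyGetD (c :: r) (i - 1) ' ' then
          (st.1, st.2.1, st.2.2 + 1)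
        else if PySem.List.pyGetD (c :: r) (i - 1) ' ' = 'A' then
          (st.1 + max 0 (st.2.2 - 2), st.2.1, 1)
        else
          (st.1, st.2.1 + max 0 (st.2.2 - 2), 1)) init
      = pairsFold c r init := by
  rw [show (fun (st : Int × Int × Int) i =>
        if PySem.List.pyGetD (c :: r) i ' ' = PySem.List.pyGetD (c :: r) (i - 1) ' ' then
          (st.1, st.2.1, st.2.2 + 1)
        else if PySem.List.pyGetD (c :: r) (i - 1) ' ' = 'A' then
          (st.1 + max 0 (st.2.2 - 2), st.2.1, 1)
        else
          (st.1, st.2.1 + max 0 (st.2.2 - 2), 1))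
      = (fun st i => stepA st (PySem.List.pyGetD (c :: r) (i - 1) ' ') (PySem.List.pyGetD (c :: r) i ' ')) from rfl]
  exact foldA_aux r c init

theorem pairsFold_finalAdd (r : List Char) : ∀ (p : Char) (a b cnt : Int),
    finalAdd (pairsFold p r (a, b, cnt)) (myLast p r) = (a, b) + runsTot p cnt r := by
  induction r with
  | nil =>
    intro p a b cnt
    unfold pairsFold myLast finalAdd runsTot pay
    split_ifs <;> simp [Prod.ext_iff]
  | cons c r ih =>
    intro p a b cnt
    show finalAdd (pairsFold c r (stepA (a, b, cnt) p c)) (myLast c r) = (a, b) + runsTot p cnt (c :: r)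
    by_cases hc : c = p
    · subst hc
      unfold stepA runsTot
      simp only [if_pos rfl]
      exact ih c a b (cnt + 1)
    · unfold stepA runsTot
      simp only [if_neg hc]
      by_cases hp : p = 'A'
      · simp only [if_pos hp]
        rw [ih c (a + max 0 (cnt - 2)) b 1]
        simp [pay, hp, Prod.ext_iff, add_assoc]
      · simp only [if_neg hp]
        rw [ih c a (b + max 0 (cnt - 2)) 1]
        simp [pay, hp, Prod.ext_iff, add_assoc]

theorem foldB_eq_tripsFold (r : List Char) : ∀ (x y : Char) (init : Int × Int),
    ((x :: y :: r).zip ((y :: r).zip r)).foldl (fun st t => stepB st t.1 t.2.1 t.2.2) init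
      = tripsFold x y r init := by
  induction r with
  | nil => intro x y init; simp [tripsFold]
  | cons z r ih =>
    intro x y init
    simp only [List.zip_cons_cons, List.foldl_cons]
    rw [ih y z (stepB init x y z)]
    rfl

theorem tripsFold_eq_add (r : List Char) : ∀ (x y : Char) (a b : Int),
    tripsFold x y r (a, b) = (a, b) + tripsT x y r := by
  induction r with
  | nil => intro x y a b; simp [tripsFold, tripsT]
  | cons z r ih =>
    intro x y a b
    show tripsFold y z r (stepB (a, b) x y z) = (a, b) + tripsT x y (z :: r)
    unfold stepB tripsT
    split_ifs with h1 h2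
    · obtain ⟨h1a, h1b⟩ := h1
      subst h1a; subst h1b
      rw [ih]; refine Prod.ext_iff.mpr ⟨?_, ?_⟩ <;> simp [pay, h2] <;> ring
    · obtain ⟨h1a, h1b⟩ := h1
      subst h1a; subst h1b
      rw [ih]; refine Prod.ext_iff.mpr ⟨?_, ?_⟩ <;> simp [pay, h2] <;> ring
    · rw [ih]; simp [Prod.ext_iff]

theorem tripsT_ne (r : List Char) (x y : Char) (h : x ≠ y) : tripsT x y r = tripsHead y r := by
  cases r with
  | nil => rfl
  | cons z r =>
    show (if x = y ∧ y = z then pay y 1 else (0, 0)) + tripsT y z r = tripsT y z r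
    rw [if_neg (by tauto)]
    simp

theorem runsTot_eq_trips (r : List Char) : ∀ (p : Char) (cnt : Int), 1 ≤ cnt →
    runsTot p cnt r = pay p (max 0 (cnt - 2)) + (if 2 ≤ cnt then tripsT p p r else tripsHead p r) := by
  induction r with
  | nil =>
    intro p cnt h
    unfold runsTot tripsT tripsHead
    split_ifs <;> rw [pair_add_zero]
  | cons c r ih =>
    intro p cnt h
    by_cases hc : c = p
    · subst hc
      show runsTot c cnt (c :: r) = _
      unfold runsTot
      simp only [if_pos rfl]
      rw [ih c (cnt + 1) (by omega)]
      by_cases h2 : 2 ≤ cnt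
      · simp only [if_pos h2, if_pos (show (2:Int) ≤ cnt + 1 by omega)]
        show _ = pay c (max 0 (cnt - 2)) + ((if c = c ∧ c = c then pay c 1 else (0, 0)) + tripsT c c r)
        simp only [eq_self_iff_true, and_self, if_true]
        have hm : max 0 (cnt + 1 - 2) = max 0 (cnt - 2) + 1 := by omega
        rw [hm, pay_succ, add_assoc]
      · have hc1 : cnt = 1 := by omega
        subst hc1
        simp [pair_zero_add, pay_zero, tripsHead,
          show (2:Int) ≤ 1 + 1 by norm_num, show ¬ (2:Int) ≤ 1 by norm_num]
    · unfold runsTot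
      rw [if_neg hc, ih c 1 le_rfl]
      rw [show max (0:Int) (1 - 2) = 0 by norm_num, pay_zero, pair_zero_add]
      by_cases h2 : 2 ≤ cnt
      · simp only [if_pos h2]
        show pay p (max 0 (cnt - 2)) + tripsHead c r
            = pay p (max 0 (cnt - 2)) + ((if p = p ∧ p = c then pay p 1 else (0, 0)) + tripsT p c r)
        rw [if_neg (by tauto), tripsT_ne r p c (fun e => hc e.symm), pair_zero_add]
      · simp only [if_neg h2]
        show pay p (max 0 (cnt - 2)) + tripsHead c r = pay p (max 0 (cnt - 2)) + tripsT p c r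
        rw [tripsT_ne r p c (fun e => hc e.symm)]

theorem getLast_eq_myLast (r : List Char) : ∀ (c : Char) (h : (c :: r) ≠ []), (c :: r).getLast h = myLast c r := by
  induction r with
  | nil => intro c h; rfl
  | cons x r ih =>
    intro c h
    rw [List.getLast_cons_cons, ih x (by simp)]
    rfl

-- final assembly on the list with an explicit head
theorem winner_eq_cons (c : Char) (r : List Char) (colors : String) (h : colors.toList = c :: r) :
    winner_of_game_improved colors = winner_of_game_improved_alt colors := by
  simp only [winner_of_game_improved, winner_of_game_improved_alt]
  rw [h]
  rw [PySem.List.pyGetD_neg_one (c :: r) ' ' (by simp)]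
  rw [getLast_eq_myLast r c (by simp)]
  rw [foldA_eq_pairsFold r c (0, 0, 1)]
  have hfin : ∀ (st : Int × Int × Int) (last : Char),
      (if last = 'A' then decide (st.1 + max 0 (st.2.2 - 2) > st.2.1)
       else decide (st.1 > st.2.1 + max 0 (st.2.2 - 2)))
      = decide ((finalAdd st last).1 > (finalAdd st last).2) := by
    intro st last
    unfold finalAdd
    split_ifs <;> rfl
  rw [hfin]
  rw [pairsFold_finalAdd r c 0 0 1]
  have hruns : runsTot c 1 r = tripsHead c r := by
    rw [runsTot_eq_trips r c 1 le_rfl]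
    rw [show max (0:Int) (1 - 2) = 0 by norm_num, pay_zero, pair_zero_add]
    rw [if_neg (show ¬ (2:Int) ≤ 1 by norm_num)]
  rw [hruns, pair_zero_add]
  cases r with
  | nil => simp [tripsHead]
  | cons y r' =>
    rw [decide_eq_decide]
    have hb : (List.foldl (fun (st : Int × Int) (t : Char × Char × Char) =>
          if t.1 = t.2.1 ∧ t.2.1 = t.2.2 then
            (if t.2.1 = 'A' then (st.1 + 1, st.2) else (st.1, st.2 + 1))
          else st) ((0 : Int), (0 : Int))
          ((c :: y :: r').zip ((c :: y :: r').tail.zip (c :: y :: r').tail.tail)))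
        = tripsHead c (y :: r') := by
      show (List.foldl (fun st t => stepB st t.1 t.2.1 t.2.2) ((0 : Int), (0 : Int))
          ((c :: y :: r').zip ((y :: r').zip r'))) = tripsHead c (y :: r')
      rw [foldB_eq_tripsFold r' c y (0, 0), tripsFold_eq_add r' c y 0 0, pair_zero_add]
      rfl
    rw [hb]

-- ===== VERDICT (by name: the statement is the Claim_ definition above) =====
theorem winner_of_game_improved_spec : Claim_equal_winner_of_game_improved := by
  intro colors _ hpre
  unfold Spec_winner_of_game_improved
  cases h : colors.toList with
  | nil => exact absurd (String.toList_eq_nil_iff.mp h) hpre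
  | cons c r => exact winner_eq_cons c r colors h
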